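-- pv_equiv track=rewrite | github.com/DrunkJin/CosMos | 221017-221023/p42885/DrunkJin_p42885.py | solution
-- ===== SOURCE A (Python) =====
-- def solution(people, limit):
--     answer = 0
--     people = sorted(people)
--     while people:
--         load = people.pop()
--         if load > limit-40:
--             answer += 1
--             continue
--         remain = limit - load
--         if remain < 40:
--             answer+=1
--             continue
--         ride_check = list(map(lambda x:x<=remain, people))
--         if True in ride_check:
--             plus = people.pop(ride_check.index(True))
--
--         answer += 1
--     return answer
-- ===== SOURCE B (Python) =====
-- def solution(people, limit):
--     p = sorted(people)
--     i, j, answer = 0, len(p) - 1, 0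
--     while i <= j:
--         if i < j and p[j] <= limit - 40 and p[i] <= limit - p[j]:
--             i += 1
--         j -= 1
--         answer += 1
--     return answer
-- ===== Notes on version B (the rewrite author's own statement) =====
-- stated objective: faster
-- what changed: Replaces the per-iteration O(n) ride_check scan + pop(index) of A with a sort-once two-pointer sweep (lightest/heaviest indices) that replicates the limit-40 threshold and lightest-partner greedy.
import Mathlib
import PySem

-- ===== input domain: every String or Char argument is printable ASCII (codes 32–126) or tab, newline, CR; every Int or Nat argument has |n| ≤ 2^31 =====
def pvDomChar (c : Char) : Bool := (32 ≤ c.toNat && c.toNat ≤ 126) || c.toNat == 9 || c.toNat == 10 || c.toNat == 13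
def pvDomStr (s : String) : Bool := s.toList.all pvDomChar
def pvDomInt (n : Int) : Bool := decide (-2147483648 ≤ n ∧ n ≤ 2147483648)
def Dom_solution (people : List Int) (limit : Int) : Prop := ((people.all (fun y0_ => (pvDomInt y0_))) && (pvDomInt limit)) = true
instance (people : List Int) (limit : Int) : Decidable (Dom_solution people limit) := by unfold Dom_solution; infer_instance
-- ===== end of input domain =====

-- B replaces A's per-iteration linear ride_check scan + pop(index) with a sort-once
-- two-pointer sweep (objective: faster, O(n log n) vs O(n^2)).

-- ===== PORT A =====
-- the while-loop of A: pop the heaviest, maybe pop the first (lightest) partner that fits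
def solutionLoop (limit : Int) (ps : List Int) : Int :=
  if h : ps = [] then 0
  else
    let load := ps.getLast h
    let rest := ps.dropLast
    if load > limit - 40 then 1 + solutionLoop limit rest
    else
      let remain := limit - load
      if remain < 40 then 1 + solutionLoop limit rest
      else
        let ride_check := rest.map (fun x => decide (x ≤ remain))
        match PySem.List.index? ride_check true with
        | some i => 1 + solutionLoop limit (rest.eraseIdx i)   -- people.pop(ride_check.index(True)), value discarded
        | none => 1 + solutionLoop limit rest
termination_by ps.length
decreasing_by
  all_goals
    have hlen : 0 < ps.length := List.length_pos_of_ne_nil h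
    first
      | (simp only [List.length_dropLast]; omega)
      | (have h2 := List.length_eraseIdx_le ps.dropLast i
         simp only [List.length_dropLast] at h2 ⊢; omega)

def solution (people : List Int) (limit : Int) : Int :=
  solutionLoop limit (PySem.List.sorted people (fun x => x) false)

-- ===== PORT B =====
-- the while-loop of B: two pointers i (lightest) and j (heaviest) over the sorted list
def solutionAltLoop (p : List Int) (limit : Int) (i j : Int) : Int :=
  if _h : i ≤ j then
    let i' := if i < j ∧ PySem.List.pyGetD p j 0 ≤ limit - 40 ∧
                 PySem.List.pyGetD p i 0 ≤ limit - PySem.List.pyGetD p j 0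
              then i + 1 else i
    solutionAltLoop p limit i' (j - 1) + 1
  else 0
termination_by (j + 1 - i).toNat
decreasing_by
  split_ifs <;> omega

def solution_alt (people : List Int) (limit : Int) : Int :=
  let p := PySem.List.sorted people (fun x => x) false
  solutionAltLoop p limit 0 ((p.length : Int) - 1)

-- ===== PRECONDITION & SPEC =====
def Spec_solution (people : List Int) (limit : Int) (out : Int) : Prop := out = solution_alt people limit
instance (people : List Int) (limit : Int) (out : Int) : Decidable (Spec_solution people limit out) := by unfold Spec_solution; infer_instance

-- ===== CLAIM (what is proved, stated in full; the proofs are below) =====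
def Claim_equal_solution : Prop := ∀ (people : List Int) (limit : Int), Dom_solution people limit → Spec_solution people limit (solution people limit)

-- ===== LEMMAS AND PROOFS =====

-- On a sorted list p, B's two-pointer loop on [i..j] computes A's loop value on the segment p[i..j].
lemma loop_eq (p : List Int) (limit : Int) (hs : p.Pairwise (· ≤ ·)) :
    ∀ (n : Nat) (i j : Int), (j + 1 - i).toNat = n → 0 ≤ i → j < (p.length : Int) →
      solutionAltLoop p limit i j =
        solutionLoop limit ((p.drop i.toNat).take (j + 1 - i).toNat) := by
  intro n
  induction n using Nat.strong_induction_on with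
  | _ n ih =>
    intro i j hn hi hj
    by_cases hij : i ≤ j
    · -- nonempty segment
      set a := i.toNat with ha
      set m := (j + 1 - i).toNat with hm
      have haj : a + m = j.toNat + 1 := by omega
      have hjp : j.toNat < p.length := by omega
      have hap : a < p.length := by omega
      have hm1 : 1 ≤ m := by omega
      set seg := (p.drop a).take m with hseg
      have hseglen : seg.length = m := by simp [hseg]; omega
      have hsegne : seg ≠ [] := by
        intro hnil; rw [hnil] at hseglen; simp at hseglen; omega
      have hlast : seg.getLast hsegne = p[j.toNat] := by
        rw [List.getLast_eq_getElem]
        rw [show seg[seg.length - 1]'(by have := List.length_pos_of_ne_nil hsegne; omega)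
              = seg[m - 1]'(by omega) from getElem_congr rfl (by omega) _]
        simp only [hseg]
        rw [List.getElem_take, List.getElem_drop]
        exact getElem_congr rfl (by omega) _
      have hdl : seg.dropLast = (p.drop a).take (m - 1) := by
        rw [List.dropLast_eq_take, hseglen, hseg, List.take_take]
        congr 1; omega
      have hgj : PySem.List.pyGetD p j 0 = p[j.toNat] :=
        PySem.List.pyGetD_eq_getElem p 0 (by omega) hj
      have hgi : PySem.List.pyGetD p i 0 = p[a] :=
        PySem.List.pyGetD_eq_getElem p 0 hi (by omega)
      -- one step of B
      rw [solutionAltLoop, dif_pos hij]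
      -- one step of A
      rw [solutionLoop, dif_neg hsegne]
      simp only [hlast, hgj, hgi]
      by_cases hb1 : p[j.toNat] > limit - 40
      · -- heaviest rides alone
        rw [if_pos hb1, if_neg (by omega : ¬ (i < j ∧ p[j.toNat] ≤ limit - 40 ∧ p[a] ≤ limit - p[j.toNat]))]
        rw [hdl, ih (m - 1) (by omega) i (j - 1) (by omega) hi (by omega)]
        have : (j - 1 + 1 - i).toNat = m - 1 := by omega
        rw [this, ha]
        ring
      · -- remain ≥ 40; second branch is dead
        rw [if_neg hb1, if_neg (by omega : ¬ limit - p[j.toNat] < 40)]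
        by_cases hpair : i < j ∧ p[a] ≤ limit - p[j.toNat]
        · -- lightest partner fits: it is the head of rest
          have hm2 : 2 ≤ m := by omega
          have hap1 : a + 1 ≤ p.length := by omega
          have hda : p.drop a = p[a] :: p.drop (a + 1) := List.drop_eq_getElem_cons hap
          have hrest : seg.dropLast = p[a] :: (p.drop (a + 1)).take (m - 2) := by
            rw [hdl, hda]
            have : m - 1 = (m - 2) + 1 := by omega
            rw [this, List.take_succ_cons]
          rw [hrest, List.map_cons]
          have hdec : decide (p[a] ≤ limit - p[j.toNat]) = true := decide_eq_true hpair.2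
          simp only [hdec, PySem.List.index?_cons_self, List.eraseIdx_cons_zero]
          rw [if_pos ⟨hpair.1, by omega, hpair.2⟩]
          rw [ih (m - 2) (by omega) (i + 1) (j - 1) (by omega) (by omega) (by omega)]
          have h1 : (j - 1 + 1 - (i + 1)).toNat = m - 2 := by omega
          have h2 : (i + 1).toNat = a + 1 := by omega
          rw [h1, h2]
          ring
        · -- no partner fits: everything in rest exceeds remain
          have hmono : ∀ x ∈ seg.dropLast, ¬ x ≤ limit - p[j.toNat] := by
            intro x hx
            have hxseg : x ∈ p.drop a := List.mem_of_mem_take (hdl ▸ hx)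
            have hxlen : seg.dropLast.length = m - 1 := by rw [hdl]; simp; omega
            have hijlt : i < j := by
              rcases Nat.lt_or_ge 1 m with h | h
              · omega
              · exfalso
                have : seg.dropLast = [] := List.eq_nil_of_length_eq_zero (by omega)
                rw [this] at hx; exact (List.not_mem_nil).elim hx
            have hgt : limit - p[j.toNat] < p[a] := by
              rcases not_and_or.mp hpair with h | h
              · exact absurd hijlt h
              · omega
            have hle : p[a] ≤ x := by
              have hda : p.drop a = p[a] :: p.drop (a + 1) := List.drop_eq_getElem_cons hap
              have hpw : (p.drop a).Pairwise (· ≤ ·) := hs.drop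
              rw [hda] at hpw hxseg
              rcases List.mem_cons.mp hxseg with rfl | hxd
              · exact le_refl _
              · exact (List.pairwise_cons.mp hpw).1 x hxd
            omega
          have hnone : PySem.List.index? (seg.dropLast.map (fun x => decide (x ≤ limit - p[j.toNat]))) true = none := by
            rw [PySem.List.index?_eq_none_iff]
            intro hmem
            obtain ⟨x, hx, hdx⟩ := List.mem_map.mp hmem
            exact hmono x hx (of_decide_eq_true hdx)
          rw [hnone]
          rw [if_neg (by intro h; exact (not_and_or.mp hpair).elim (fun h' => h' h.1) (fun h' => h' h.2.2))]
          rw [hdl, ih (m - 1) (by omega) i (j - 1) (by omega) hi (by omega)]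
          have : (j - 1 + 1 - i).toNat = m - 1 := by omega
          rw [this, ha]
          ring
    · -- empty segment: both loops stop
      have h0 : (j + 1 - i).toNat = 0 := by omega
      rw [solutionAltLoop, dif_neg hij, h0]
      simp [solutionLoop]

-- ===== VERDICT (by name: the statement is the Claim_ definition above) =====
theorem solution_spec : Claim_equal_solution := by
  intro people limit _
  unfold Spec_solution solution solution_alt
  set sp := PySem.List.sorted people (fun x => x) false with hsp
  have hs : sp.Pairwise (· ≤ ·) := PySem.List.sorted_pairwise ..
  have h := loop_eq sp limit hs ((sp.length : Int) - 1 + 1 - 0).toNat 0 ((sp.length : Int) - 1)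
    rfl (le_refl 0) (by omega)
  rw [h]
  congr 1
  rw [Int.toNat_zero, List.drop_zero]
  rw [show ((sp.length : Int) - 1 + 1 - 0).toNat = sp.length by omega]
  exact (List.take_length ..).symm
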